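-- pv_equiv track=rewrite | github.com/Andrew-Cutlip/Travelon | src/server/validation.py | check_post_images
-- ===== SOURCE A (Python) =====
-- def check_post_images(images, user_posts):
--     for image in images:
--         for post in user_posts:
--             img_ids = post.get("img_ids")
--             if img_ids is not None:
--                 for img_id in img_ids:
--                     if img_id == image:
--                         return False
--     return True
-- ===== SOURCE B (Python) =====
-- def check_post_images(images, user_posts):
--     posted = set()
--     for post in user_posts:
--         ids = post.get("img_ids")
--         if ids is not None:
--             posted.update(ids)
--     return posted.isdisjoint(images)
-- ===== Notes on version B (the rewrite author's own statement) =====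
-- stated objective: alternative
-- what changed: Replaces the triple-nested scan with two staged phases: first accumulate the union of all posted img_ids into one set, then decide the answer as a set-disjointness test against images; there is no per-image rescan and no early-return nested loop.
import Mathlib
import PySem

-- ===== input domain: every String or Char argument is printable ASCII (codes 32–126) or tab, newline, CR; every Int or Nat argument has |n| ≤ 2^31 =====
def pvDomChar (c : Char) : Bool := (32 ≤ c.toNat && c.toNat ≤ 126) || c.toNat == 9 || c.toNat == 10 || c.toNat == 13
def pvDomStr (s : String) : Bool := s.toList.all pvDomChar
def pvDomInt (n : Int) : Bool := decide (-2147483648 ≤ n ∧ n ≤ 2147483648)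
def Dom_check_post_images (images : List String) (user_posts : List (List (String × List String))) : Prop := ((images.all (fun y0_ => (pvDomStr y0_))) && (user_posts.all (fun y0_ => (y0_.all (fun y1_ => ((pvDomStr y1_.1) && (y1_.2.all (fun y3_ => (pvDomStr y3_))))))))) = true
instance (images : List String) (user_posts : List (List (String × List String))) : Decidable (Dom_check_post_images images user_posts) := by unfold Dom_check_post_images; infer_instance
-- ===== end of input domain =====

-- B replaces the nested per-image rescans with two staged phases: accumulate the union of all
-- posted img_ids into one set, then answer by a disjointness test against images (objective: alternative).

-- ===== PORT A =====
-- inner `for img_id in img_ids: if img_id == image: return False`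
def aScanIds (image : String) : List String → Bool
  | [] => false
  | i :: rest => if i == image then true else aScanIds image rest

-- middle `for post in user_posts` for a fixed image; true = "return False was hit"
def aScanPosts (image : String) : List (List (String × List String)) → Bool
  | [] => false
  | post :: rest =>
    match (PySem.Dict.mk post).get? "img_ids" with
    | some ids => if aScanIds image ids then true else aScanPosts image rest
    | none => aScanPosts image rest

-- outer `for image in images`
def aLoop (user_posts : List (List (String × List String))) : List String → Bool
  | [] => true
  | image :: rest => if aScanPosts image user_posts then false else aLoop user_posts rest

def check_post_images (images : List String) (user_posts : List (List (String × List String))) : Bool :=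
  aLoop user_posts images

-- ===== PORT B =====
-- phase 1: `posted = set(); for post in user_posts: ids = post.get("img_ids"); if ids is not None: posted.update(ids)`
def bGather : PySem.Set String → List (List (String × List String)) → PySem.Set String
  | posted, [] => posted
  | posted, post :: rest =>
    match (PySem.Dict.mk post).get? "img_ids" with
    | some ids => bGather (PySem.Set.update posted ids) rest
    | none => bGather posted rest

-- phase 2: `return posted.isdisjoint(images)`
def check_post_images_alt (images : List String) (user_posts : List (List (String × List String))) : Bool :=
  PySem.Set.isdisjoint (bGather PySem.Set.empty user_posts) images

-- ===== PRECONDITION & SPEC =====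
def Spec_check_post_images (images : List String) (user_posts : List (List (String × List String))) (out : Bool) : Prop := out = check_post_images_alt images user_posts
instance (images : List String) (user_posts : List (List (String × List String))) (out : Bool) : Decidable (Spec_check_post_images images user_posts out) := by unfold Spec_check_post_images; infer_instance

-- ===== CLAIM (what is proved, stated in full; the proofs are below) =====
def Claim_equal_check_post_images : Prop := ∀ (images : List String) (user_posts : List (List (String × List String))), Dom_check_post_images images user_posts → Spec_check_post_images images user_posts (check_post_images images user_posts)

-- ===== LEMMAS AND PROOFS =====

theorem aScanIds_iff (image : String) (ids : List String) :
    aScanIds image ids = true ↔ image ∈ ids := by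
  induction ids with
  | nil => simp [aScanIds]
  | cons i rest ih =>
    simp only [aScanIds]
    by_cases h : i = image
    · simp [h]
    · simp [h, ih, Ne.symm h, beq_iff_eq]

theorem aScanPosts_iff (image : String) (ups : List (List (String × List String))) :
    aScanPosts image ups = true ↔
      ∃ p ∈ ups, ∃ ids, (PySem.Dict.mk p).get? "img_ids" = some ids ∧ image ∈ ids := by
  induction ups with
  | nil => simp [aScanPosts]
  | cons post rest ih =>
    simp only [aScanPosts]
    cases h : (PySem.Dict.mk post).get? "img_ids" with
    | none =>
      dsimp only
      rw [ih]
      constructor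
      · rintro ⟨p, hp, ids, h', hm⟩; exact ⟨p, by simp [hp], ids, h', hm⟩
      · rintro ⟨p, hp, ids, h', hm⟩
        rcases List.mem_cons.mp hp with rfl | hp'
        · rw [h] at h'; cases h'
        · exact ⟨p, hp', ids, h', hm⟩
    | some ids =>
      dsimp only
      by_cases hf : aScanIds image ids = true
      · rw [if_pos hf]
        have hm := (aScanIds_iff image ids).mp hf
        constructor
        · intro _; exact ⟨post, by simp, ids, h, hm⟩
        · intro _; rfl
      · rw [if_neg hf, ih]
        have hnot : image ∉ ids := fun hm => hf ((aScanIds_iff image ids).mpr hm)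
        constructor
        · rintro ⟨p, hp, ids', h', hm⟩; exact ⟨p, by simp [hp], ids', h', hm⟩
        · rintro ⟨p, hp, ids', h', hm⟩
          rcases List.mem_cons.mp hp with rfl | hp'
          · rw [h] at h'; cases h'; exact absurd hm hnot
          · exact ⟨p, hp', ids', h', hm⟩

theorem aLoop_iff (ups : List (List (String × List String))) (images : List String) :
    aLoop ups images = true ↔
      ¬ ∃ im ∈ images, ∃ p ∈ ups, ∃ ids, (PySem.Dict.mk p).get? "img_ids" = some ids ∧ im ∈ ids := by
  induction images with
  | nil => simp [aLoop]
  | cons image rest ih =>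
    simp only [aLoop]
    by_cases h : aScanPosts image ups = true
    · rw [if_pos h]
      have hp := (aScanPosts_iff image ups).mp h
      constructor
      · intro hf; cases hf
      · intro hn; exact absurd ⟨image, by simp, hp⟩ hn
    · rw [if_neg h, ih]
      have hnp := fun hx => h ((aScanPosts_iff image ups).mpr hx)
      constructor
      · rintro hn ⟨im, him, hrest⟩
        rcases List.mem_cons.mp him with rfl | him'
        · exact hnp hrest
        · exact hn ⟨im, him', hrest⟩
      · rintro hn ⟨im, him, hrest⟩
        exact hn ⟨im, by simp [him], hrest⟩

theorem mem_bGather (x : String) (acc : PySem.Set String) (ups : List (List (String × List String))) :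
    x ∈ bGather acc ups ↔
      x ∈ acc ∨ ∃ p ∈ ups, ∃ ids, (PySem.Dict.mk p).get? "img_ids" = some ids ∧ x ∈ ids := by
  induction ups generalizing acc with
  | nil => simp [bGather]
  | cons post rest ih =>
    simp only [bGather]
    cases h : (PySem.Dict.mk post).get? "img_ids" with
    | none =>
      dsimp only
      rw [ih]
      constructor
      · rintro (ha | ⟨p, hp, ids, h', hm⟩)
        · exact Or.inl ha
        · exact Or.inr ⟨p, by simp [hp], ids, h', hm⟩
      · rintro (ha | ⟨p, hp, ids, h', hm⟩)
        · exact Or.inl ha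
        · rcases List.mem_cons.mp hp with rfl | hp'
          · rw [h] at h'; cases h'
          · exact Or.inr ⟨p, hp', ids, h', hm⟩
    | some ids =>
      dsimp only
      rw [ih, PySem.Set.mem_update]
      constructor
      · rintro ((ha | hi) | ⟨p, hp, ids', h', hm⟩)
        · exact Or.inl ha
        · exact Or.inr ⟨post, by simp, ids, h, hi⟩
        · exact Or.inr ⟨p, by simp [hp], ids', h', hm⟩
      · rintro (ha | ⟨p, hp, ids', h', hm⟩)
        · exact Or.inl (Or.inl ha)
        · rcases List.mem_cons.mp hp with rfl | hp'
          · rw [h] at h'; cases h'; exact Or.inl (Or.inr hm)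
          · exact Or.inr ⟨p, hp', ids', h', hm⟩

-- ===== VERDICT (by name: the statement is the Claim_ definition above) =====
theorem check_post_images_spec : Claim_equal_check_post_images := by
  intro images user_posts _
  unfold Spec_check_post_images check_post_images check_post_images_alt
  rw [Bool.eq_iff_iff, aLoop_iff, PySem.Set.isdisjoint_iff]
  constructor
  · intro hn x hx him
    rcases (mem_bGather x _ _).mp hx with ha | ⟨p, hp, ids, h', hi⟩
    · simp [PySem.Set.empty] at ha
    · exact hn ⟨x, him, p, hp, ids, h', hi⟩
  · rintro hall ⟨im, him, p, hp, ids, h', hi⟩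
    exact hall im ((mem_bGather im _ _).mpr (Or.inr ⟨p, hp, ids, h', hi⟩)) him
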